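-- pv_equiv track=rewrite | github.com/mariakainat2025/Contrastive-learning-methodology | scripts/triplet_to_text.py | deduplicate_sentences
-- ===== SOURCE A (Python) =====
-- from typing import List, Optional
--
-- def deduplicate_sentences(sentences: List[str]) -> List[str]:
--     if not sentences:
--         return []
--
--     deduped = [sentences[0]]
--     for s in sentences[1:]:
--         if s != deduped[-1]:
--             deduped.append(s)
--
--     i = 0
--     while i <= len(deduped) - 4:
--         if deduped[i] == deduped[i + 2] and deduped[i + 1] == deduped[i + 3]:
--             del deduped[i + 2: i + 4]
--         else:
--             i += 1
--
--     return deduped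
-- ===== SOURCE B (Python) =====
-- from typing import List
--
-- def deduplicate_sentences(sentences: List[str]) -> List[str]:
--     # drop adjacent duplicates by pairing each element with its predecessor
--     deduped = [s for s, prev in zip(sentences, [None] + sentences) if s != prev]
--     # collapse repeated sentence pairs (ABAB -> AB) in one stack pass
--     stack = []
--     for s in deduped:
--         stack.append(s)
--         if len(stack) >= 4 and stack[-4] == stack[-2] and stack[-3] == stack[-1]:
--             del stack[-2:]
--     return stack
-- ===== Notes on version B (the rewrite author's own statement) =====
-- stated objective: alternative
-- what changed: A's pair-collapse rescans with an index and deletes slices from the middle of the list, and builds the dedup by repeated appends with a last-element test; B dedups via a zip-with-predecessor comprehension and collapses ABAB pairs in one left-to-right stack pass, popping the top two entries when the last four form an ABAB pattern.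
import Mathlib
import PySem

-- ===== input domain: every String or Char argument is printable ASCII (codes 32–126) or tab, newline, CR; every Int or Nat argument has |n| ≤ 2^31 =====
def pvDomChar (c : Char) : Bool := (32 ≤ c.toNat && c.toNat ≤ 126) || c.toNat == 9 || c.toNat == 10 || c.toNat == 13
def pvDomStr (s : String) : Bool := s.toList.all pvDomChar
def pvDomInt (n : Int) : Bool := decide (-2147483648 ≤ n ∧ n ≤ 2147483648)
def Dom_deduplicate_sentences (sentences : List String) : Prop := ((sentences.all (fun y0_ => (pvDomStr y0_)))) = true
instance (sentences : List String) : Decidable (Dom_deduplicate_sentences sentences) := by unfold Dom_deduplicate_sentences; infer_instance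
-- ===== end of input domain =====

-- B replaces A's index-rescanning while-loop with in-place deletions by a single left-to-right stack pass (and A's append-loop dedup by a zip comprehension); the return value is proved identical.

-- ===== PORT A =====
-- A's while loop: index i, test window [i..i+3], on match delete slice [i+2:i+4] and stay, else i += 1
def pairLoopA (l : List String) (i : Nat) : List String :=
  if h : i + 4 ≤ l.length then
    if l[i]? = l[i+2]? ∧ l[i+1]? = l[i+3]? then
      pairLoopA (l.take (i+2) ++ l.drop (i+4)) i
    else
      pairLoopA l (i+1)
  else l
termination_by l.length - i
decreasing_by
  · simp only [List.length_append, List.length_take, List.length_drop]; omega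
  · omega

def deduplicate_sentences (sentences : List String) : List String :=
  match sentences with
  | [] => []
  | s0 :: rest =>
    -- for s in sentences[1:]: if s != deduped[-1]: deduped.append(s)
    let deduped := rest.foldl (fun acc s => if some s ≠ acc.getLast? then acc ++ [s] else acc) [s0]
    pairLoopA deduped 0

-- ===== PORT B =====
-- [s for s, prev in zip(sentences, [None] + sentences) if s != prev]
def dedupB (sentences : List String) : List String :=
  ((sentences.zip ((none : Option String) :: sentences.map some)).filter
    (fun p => some p.1 ≠ p.2)).map Prod.fst

-- stack pass: push s; if the last four entries are A,B,A,B then pop the last two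
def stackGo (stack : List String) (rest : List String) : List String :=
  match rest with
  | [] => stack.reverse
  | s :: r =>
    match s :: stack with
    | d :: c :: b :: a :: tl =>
      if a = c ∧ b = d then stackGo (b :: a :: tl) r else stackGo (d :: c :: b :: a :: tl) r
    | st => stackGo st r

def deduplicate_sentences_alt (sentences : List String) : List String :=
  stackGo [] (dedupB sentences)

-- ===== PRECONDITION & SPEC =====
def Spec_deduplicate_sentences (sentences : List String) (out : List String) : Prop := out = deduplicate_sentences_alt sentences
instance (sentences : List String) (out : List String) : Decidable (Spec_deduplicate_sentences sentences out) := by unfold Spec_deduplicate_sentences; infer_instance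

-- ===== CLAIM (what is proved, stated in full; the proofs are below) =====
def Claim_equal_deduplicate_sentences : Prop := ∀ (sentences : List String), Dom_deduplicate_sentences sentences → Spec_deduplicate_sentences sentences (deduplicate_sentences sentences)

-- ===== LEMMAS AND PROOFS =====

-- canonical adjacent-dedup with the previous element made explicit
def dedupSpec (prev : String) : List String → List String
  | [] => []
  | s :: r => if s = prev then dedupSpec prev r else s :: dedupSpec s r

-- canonical pair-collapse: after a deletion, re-check from the same spot
def fSpec : List String → List String
  | a :: b :: c :: d :: t => if a = c ∧ b = d then fSpec (a :: b :: t) else a :: fSpec (b :: c :: d :: t)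
  | l => l
termination_by l => l.length
decreasing_by all_goals (simp only [List.length_cons]; omega)

theorem fSpec_short (l : List String) (h : l.length < 4) : fSpec l = l := by
  match l with
  | [] => simp [fSpec]
  | [a] => simp [fSpec]
  | [a, b] => simp [fSpec]
  | [a, b, c] => simp [fSpec]
  | a :: b :: c :: d :: t => simp only [List.length_cons] at h; omega

theorem dedupA_spec (t : List String) : ∀ (acc : List String) (x : String),
    t.foldl (fun acc s => if some s ≠ acc.getLast? then acc ++ [s] else acc) (acc ++ [x])
      = acc ++ x :: dedupSpec x t := by
  induction t with
  | nil => simp [dedupSpec]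
  | cons s r ih =>
    intro acc x
    rw [List.foldl_cons]
    by_cases hsx : s = x
    · subst hsx
      have h1 : (if some s ≠ (acc ++ [s]).getLast? then (acc ++ [s]) ++ [s] else acc ++ [s]) = acc ++ [s] := by
        simp [List.getLast?_append]
      rw [h1, ih acc s]
      simp [dedupSpec]
    · have h1 : (if some s ≠ (acc ++ [x]).getLast? then (acc ++ [x]) ++ [s] else acc ++ [x]) = (acc ++ [x]) ++ [s] := by
        simp [List.getLast?_append, hsx]
      rw [h1]
      have := ih (acc ++ [x]) s
      simp only [List.append_assoc] at this ⊢
      rw [this]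
      simp [dedupSpec, hsx]

theorem dedupB_spec (t : List String) : ∀ (x : String),
    ((t.zip ((x :: t).map some)).filter (fun p => some p.1 ≠ p.2)).map Prod.fst = dedupSpec x t := by
  induction t with
  | nil => intro x; simp [dedupSpec]
  | cons s r ih =>
    intro x
    simp only [List.map_cons, List.zip_cons_cons, List.filter_cons, dedupSpec]
    by_cases hsx : s = x
    · simpa [hsx] using ih x
    · simpa [hsx] using ih s

theorem pairLoopA_spec (n : Nat) : ∀ (l : List String) (i : Nat), l.length - i ≤ n →
    pairLoopA l i = l.take i ++ fSpec (l.drop i) := by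
  induction n with
  | zero =>
    intro l i hn
    rw [pairLoopA]
    have h4 : ¬ (i + 4 ≤ l.length) := by omega
    rw [dif_neg h4]
    rw [fSpec_short _ (by simp only [List.length_drop]; omega)]
    exact (List.take_append_drop i l).symm
  | succ n ih =>
    intro l i hn
    rw [pairLoopA]
    by_cases h4 : i + 4 ≤ l.length
    · rw [dif_pos h4]
      rcases hd : l.drop i with _ | ⟨a, _ | ⟨b, _ | ⟨c, _ | ⟨d, t⟩⟩⟩⟩ <;>
        first
        | (exfalso; have := congrArg List.length hd; simp only [List.length_drop, List.length_cons, List.length_nil] at this; omega)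
        | skip
      have e0 : l[i]? = some a := by
        have h : (l.drop i)[0]? = some a := by rw [hd]; simp
        rw [List.getElem?_drop] at h; simpa using h
      have e1 : l[i+1]? = some b := by
        have h : (l.drop i)[1]? = some b := by rw [hd]; simp
        rw [List.getElem?_drop] at h; simpa using h
      have e2 : l[i+2]? = some c := by
        have h : (l.drop i)[2]? = some c := by rw [hd]; simp
        rw [List.getElem?_drop] at h; simpa using h
      have e3 : l[i+3]? = some d := by
        have h : (l.drop i)[3]? = some d := by rw [hd]; simp
        rw [List.getElem?_drop] at h; simpa using h
      have htake2 : l.take (i+2) = l.take i ++ [a, b] := by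
        rw [List.take_add, hd]; rfl
      have hdrop4 : l.drop (i+4) = t := by
        rw [← List.drop_drop, hd]; rfl
      have htake1 : l.take (i+1) = l.take i ++ [a] := by
        rw [List.take_add, hd]; rfl
      have hdrop1 : l.drop (i+1) = b :: c :: d :: t := by
        rw [← List.drop_drop, hd]; rfl
      have hlentake : (l.take i).length = i := by simp; omega
      have hlend : l.length - i = t.length + 4 := by
        have h := congrArg List.length hd
        simp only [List.length_drop, List.length_cons] at h
        omega
      rw [e0, e1, e2, e3]
      by_cases hc : a = c ∧ b = d
      · rw [if_pos (by simp [hc.1, hc.2]), fSpec]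
        rw [if_pos hc]
        rw [htake2, hdrop4]
        have h5 : (l.take i ++ [a, b]) ++ t = l.take i ++ (a :: b :: t) := by simp
        rw [h5]
        rw [ih (l.take i ++ (a :: b :: t)) i
          (by simp only [List.length_append, List.length_cons, hlentake]; omega)]
        rw [List.take_left' hlentake, List.drop_left' hlentake]
      · rw [if_neg (by simpa using hc), fSpec, if_neg hc]
        rw [ih l (i+1) (by omega), htake1, hdrop1]
        simp
    · rw [dif_neg h4]
      rw [fSpec_short _ (by simp only [List.length_drop]; omega)]
      exact (List.take_append_drop i l).symm

-- invariants of the stack pass: the top window of the stack cannot itself complete a match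
def Inv3 (st : List String) : Prop :=
  match st with
  | c :: b :: a :: x :: _ => ¬(a = c ∧ x = b)
  | _ => True

def Inv2 (st : List String) : Prop :=
  match st with
  | b :: _ :: x :: _ => x ≠ b
  | _ => True

theorem stackGo_spec (rest : List String) : ∀ (st : List String) (k : Nat),
    ((k = min 3 st.length ∧ Inv3 st) ∨ (k = 2 ∧ 3 ≤ st.length ∧ Inv2 st)) →
    stackGo st rest = (st.drop k).reverse ++ fSpec ((st.take k).reverse ++ rest) := by
  induction rest with
  | nil =>
    intro st k hk
    have hk3 : k ≤ 3 := by rcases hk with ⟨h, -⟩ | ⟨h, -⟩ <;> omega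
    rw [stackGo]
    rw [List.append_nil, fSpec_short _ (by simp only [List.length_reverse, List.length_take]; omega)]
    rw [← List.reverse_append, List.take_append_drop]
  | cons s r ih =>
    intro st k hk
    rw [stackGo]
    match st with
    | [] =>
      rcases hk with ⟨hkv, -⟩ | ⟨-, h3, -⟩
      · simp only [List.length_nil, Nat.min_zero] at hkv
        subst hkv
        show stackGo [s] r = _
        rw [ih [s] 1 (Or.inl ⟨by simp, trivial⟩)]
        simp
      · simp at h3
    | [p1] =>
      rcases hk with ⟨hkv, -⟩ | ⟨-, h3, -⟩
      · simp only [List.length_cons, List.length_nil] at hkv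
        subst hkv
        show stackGo [s, p1] r = _
        rw [ih [s, p1] 2 (Or.inl ⟨by simp, trivial⟩)]
        simp
      · simp at h3
    | [p1, p2] =>
      rcases hk with ⟨hkv, -⟩ | ⟨-, h3, -⟩
      · simp only [List.length_cons, List.length_nil] at hkv
        subst hkv
        show stackGo [s, p1, p2] r = _
        rw [ih [s, p1, p2] 3 (Or.inl ⟨by simp, trivial⟩)]
        simp
      · simp at h3
    | p1 :: p2 :: p3 :: tl =>
      rcases hk with ⟨hkv, hinv⟩ | ⟨hkv, -, hinv⟩
      · have hk3 : k = 3 := by simp only [List.length_cons] at hkv; omega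
        subst hk3
        show (if p3 = p1 ∧ p2 = s then stackGo (p2 :: p3 :: tl) r
              else stackGo (s :: p1 :: p2 :: p3 :: tl) r) = _
        by_cases hc : p3 = p1 ∧ p2 = s
        · rw [if_pos hc]
          have harg : ((p1 :: p2 :: p3 :: tl).take 3).reverse ++ s :: r = p3 :: p2 :: p1 :: s :: r := by simp
          rw [harg, fSpec, if_pos hc]
          have hnext : (2 = min 3 (p2 :: p3 :: tl).length ∧ Inv3 (p2 :: p3 :: tl)) ∨
              (2 = 2 ∧ 3 ≤ (p2 :: p3 :: tl).length ∧ Inv2 (p2 :: p3 :: tl)) := by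
            match tl with
            | [] => exact Or.inl ⟨by simp, trivial⟩
            | x :: tl2 =>
              refine Or.inr ⟨rfl, by simp, ?_⟩
              simp only [Inv2]
              simp only [Inv3] at hinv
              intro hxp2
              exact hinv ⟨hc.1, hxp2⟩
          rw [ih (p2 :: p3 :: tl) 2 hnext]
          simp
        · rw [if_neg hc]
          have hinv' : Inv3 (s :: p1 :: p2 :: p3 :: tl) := by
            simp only [Inv3]
            intro ⟨h1, h2⟩
            exact hc ⟨h2, h1⟩
          rw [ih (s :: p1 :: p2 :: p3 :: tl) 3 (Or.inl ⟨by simp, hinv'⟩)]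
          have harg : ((p1 :: p2 :: p3 :: tl).take 3).reverse ++ s :: r = p3 :: p2 :: p1 :: s :: r := by simp
          rw [harg, fSpec, if_neg hc]
          simp
      · subst hkv
        show (if p3 = p1 ∧ p2 = s then stackGo (p2 :: p3 :: tl) r
              else stackGo (s :: p1 :: p2 :: p3 :: tl) r) = _
        have hp31 : p3 ≠ p1 := by simpa only [Inv2] using hinv
        rw [if_neg (fun h => hp31 h.1)]
        have hinv' : Inv3 (s :: p1 :: p2 :: p3 :: tl) := by
          simp only [Inv3]
          intro ⟨h1, h2⟩
          exact hp31 h2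
        rw [ih (s :: p1 :: p2 :: p3 :: tl) 3 (Or.inl ⟨by simp, hinv'⟩)]
        simp

-- ===== VERDICT (by name: the statement is the Claim_ definition above) =====
theorem deduplicate_sentences_spec : Claim_equal_deduplicate_sentences := by
  intro sentences _
  unfold Spec_deduplicate_sentences deduplicate_sentences deduplicate_sentences_alt
  match sentences with
  | [] => simp [dedupB, stackGo]
  | s0 :: rest =>
    have hA : rest.foldl (fun acc s => if some s ≠ acc.getLast? then acc ++ [s] else acc) [s0]
        = s0 :: dedupSpec s0 rest := by
      simpa using dedupA_spec rest [] s0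
    have hB : dedupB (s0 :: rest) = s0 :: dedupSpec s0 rest := by
      unfold dedupB
      simp only [List.map_cons, List.zip_cons_cons, List.filter_cons]
      simpa using dedupB_spec rest s0
    simp only [hA, hB]
    rw [pairLoopA_spec (s0 :: dedupSpec s0 rest).length _ 0 (by omega)]
    rw [stackGo_spec _ [] 0 (Or.inl ⟨by simp, trivial⟩)]
    simp
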